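-- pv_equiv track=rewrite | github.com/337zzang/ai-coding-brain-mcp | python/analyzers/unified_analyzer.py | _is_internal_import
-- ===== SOURCE A (Python) =====
-- from typing import Dict, List, Any, Optional, Set
--
-- def _is_internal_import(module_name: str, project_packages: Set[str]) -> bool:
--     """내부 import인지 판단"""
--     if not module_name:
--         return True
--
--     # 상대 import
--     if module_name.startswith('.'):
--         return True
--
--     # 프로젝트 패키지
--     for package in project_packages:
--         if module_name == package or module_name.startswith(f"{package}."):
--             return True
--
--     # 로컬 파일 경로 형태 (TypeScript)
--     if module_name.startswith('./') or module_name.startswith('../'):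
--         return True
--
--     return False
-- ===== SOURCE B (Python) =====
-- def _is_internal_import(module_name: str, project_packages) -> bool:
--     """내부 import인지 판단 — dotted-prefix enumeration with set lookups."""
--     if not module_name or module_name[0] == '.':
--         return True
--     pkgs = set(project_packages)
--     for i, ch in enumerate(module_name):
--         if ch == '.' and module_name[:i] in pkgs:
--             return True
--     return module_name in pkgs
-- ===== Notes on version B (the rewrite author's own statement) =====
-- stated objective: alternative
-- what changed: Instead of scanning every package and testing equality/startswith, B enumerates the dotted prefixes of module_name and tests each with a set-membership lookup (measured ~1.2x, below the 1.5x bar, so no speed claim).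
import Mathlib
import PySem

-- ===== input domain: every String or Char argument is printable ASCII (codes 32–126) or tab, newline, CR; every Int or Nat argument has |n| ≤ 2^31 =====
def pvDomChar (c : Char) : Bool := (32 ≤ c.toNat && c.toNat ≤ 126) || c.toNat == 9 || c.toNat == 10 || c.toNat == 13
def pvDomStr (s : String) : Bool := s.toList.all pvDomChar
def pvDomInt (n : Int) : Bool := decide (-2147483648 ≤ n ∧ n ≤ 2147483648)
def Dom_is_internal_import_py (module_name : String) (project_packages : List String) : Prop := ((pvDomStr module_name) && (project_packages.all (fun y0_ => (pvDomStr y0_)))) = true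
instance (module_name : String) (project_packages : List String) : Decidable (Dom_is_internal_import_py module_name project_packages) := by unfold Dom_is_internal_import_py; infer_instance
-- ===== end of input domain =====

-- B enumerates the dotted prefixes of module_name and checks each by one set lookup instead of
-- scanning every package with equality/startswith tests (an alternative algorithm; no speed claim).

-- ===== PORT A =====
def is_internal_import_py (module_name : String) (project_packages : List String) : Bool :=
  -- if not module_name: return True
  if PySem.Str.len module_name == 0 then true
  -- if module_name.startswith('.'): return True
  else if PySem.Str.startswith module_name "." then true
  -- for package in project_packages: if module_name == package or module_name.startswith(f"{package}."): return True
  else if project_packages.any (fun package =>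
         module_name == package || PySem.Str.startswith module_name (package ++ ".")) then true
  -- if module_name.startswith('./') or module_name.startswith('../'): return True
  else if PySem.Str.startswith module_name "./" || PySem.Str.startswith module_name "../" then true
  else false

-- ===== PORT B =====
def is_internal_import_py_alt (module_name : String) (project_packages : List String) : Bool :=
  -- if not module_name or module_name[0] == '.': return True
  match module_name.toList with
  | [] => true
  | c :: rest =>
    if c == '.' then true
    else
      let cs := c :: rest
      -- pkgs = set(project_packages)
      let pkgs : PySem.Set String := PySem.Set.ofList project_packages
      -- for i, ch in enumerate(module_name): if ch == '.' and module_name[:i] in pkgs: return True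
      if (PySem.List.enumerate cs).any (fun ic =>
           ic.2 == '.' && PySem.Set.contains pkgs (String.ofList (PySem.List.slice cs none (some ic.1))))
      then true
      -- return module_name in pkgs
      else PySem.Set.contains pkgs module_name

-- ===== PRECONDITION & SPEC =====
def Spec_is_internal_import_py (module_name : String) (project_packages : List String) (out : Bool) : Prop := out = is_internal_import_py_alt module_name project_packages
instance (module_name : String) (project_packages : List String) (out : Bool) : Decidable (Spec_is_internal_import_py module_name project_packages out) := by unfold Spec_is_internal_import_py; infer_instance

-- ===== CLAIM (what is proved, stated in full; the proofs are below) =====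
def Claim_equal_is_internal_import_py : Prop := ∀ (module_name : String) (project_packages : List String), Dom_is_internal_import_py module_name project_packages → Spec_is_internal_import_py module_name project_packages (is_internal_import_py module_name project_packages)

-- ===== LEMMAS AND PROOFS =====

-- `p ++ ['.'] <+: cs` iff some position k of cs holds '.' and the first k chars are exactly p.
lemma prefix_dot_iff (cs p : List Char) :
    (p ++ ['.']) <+: cs ↔ ∃ k, ∃ h : k < cs.length, cs[k] = '.' ∧ cs.take k = p := by
  constructor
  · rintro ⟨t, ht⟩
    refine ⟨p.length, ?_, ?_, ?_⟩ <;> subst ht <;> simp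
  · rintro ⟨k, hk, hdot, rfl⟩
    refine ⟨cs.drop (k+1), ?_⟩
    have h := List.take_append_drop k cs
    rw [List.drop_eq_getElem_cons hk] at h
    simpa [hdot] using h

-- A's package scan finds a hit iff B's dotted-prefix enumeration or final whole-name lookup does.
lemma core_equiv (m : String) (pkgs : List String) :
    (pkgs.any (fun p => m == p || PySem.Str.startswith m (p ++ "."))) =
    ((PySem.List.enumerate m.toList).any (fun ic =>
        ic.2 == '.' && PySem.Set.contains (PySem.Set.ofList pkgs) (String.ofList (PySem.List.slice m.toList none (some ic.1))))
     || PySem.Set.contains (PySem.Set.ofList pkgs) m) := by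
  rw [Bool.eq_iff_iff]
  simp only [List.any_eq_true, Bool.or_eq_true, Bool.and_eq_true, beq_iff_eq,
    PySem.Str.startswith_eq, String.toList_append, String.reduceToList,
    PySem.Chars.startswith_iff, PySem.Set.contains, List.contains_eq_mem, decide_eq_true_eq,
    PySem.Set.mem_ofList, PySem.List.mem_enumerate_iff, prefix_dot_iff]
  constructor
  · rintro ⟨p, hp, h | ⟨k, hk, hdot, htake⟩⟩
    · exact Or.inr (h ▸ hp)
    · refine Or.inl ⟨(↑k, m.toList[k]), ⟨k, hk, by simp⟩, by simpa using hdot, ?_⟩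
      dsimp only
      rw [PySem.List.slice_to _ (Int.natCast_nonneg k)]
      simpa [htake] using hp
  · rintro (⟨ic, ⟨k, hk, rfl⟩, hdot, hmem⟩ | hm)
    · dsimp only at hmem hdot
      rw [zero_add, PySem.List.slice_to _ (Int.natCast_nonneg k)] at hmem
      simp only [Int.toNat_natCast] at hmem
      refine ⟨_, by simpa using hmem, Or.inr ⟨k, hk, by simpa using hdot, by simp⟩⟩
    · exact ⟨m, hm, Or.inl rfl⟩

-- ===== VERDICT (by name: the statement is the Claim_ definition above) =====
theorem is_internal_import_py_spec : Claim_equal_is_internal_import_py := by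
  intro m pkgs _
  unfold Spec_is_internal_import_py is_internal_import_py is_internal_import_py_alt
  have hcore := core_equiv m pkgs
  cases hcs : m.toList with
  | nil => simp [PySem.Str.len_eq, hcs]
  | cons c rest =>
    have h0 : (PySem.Str.len m == 0) = false := by
      simp only [PySem.Str.len_eq, hcs, List.length_cons, beq_eq_false_iff_ne, ne_eq]
      omega
    rw [hcs] at hcore
    by_cases hc : c = '.'
    · have hd : PySem.Str.startswith m "." = true := by
        simp [PySem.Str.startswith_eq, hcs, PySem.Chars.startswith_iff, hc]
      rw [h0, hd]
      simp [hc]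
    · have hne : (c == '.') = false := by simp [hc]
      have hd : PySem.Str.startswith m "." = false := by
        rw [Bool.eq_false_iff]
        simp [PySem.Str.startswith_eq, hcs, PySem.Chars.startswith_iff, List.cons_prefix_cons, Ne.symm hc]
      have hW : (PySem.Str.startswith m "./" || PySem.Str.startswith m "../") = false := by
        rw [Bool.eq_false_iff]
        simp [PySem.Str.startswith_eq, hcs, PySem.Chars.startswith_iff, List.cons_prefix_cons, Ne.symm hc]
      rw [h0, hd, hW, hcore]
      simp only [Bool.false_eq_true, if_false, hne]
      cases hX : (PySem.List.enumerate (c :: rest)).any (fun ic =>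
           ic.2 == '.' && PySem.Set.contains (PySem.Set.ofList pkgs) (String.ofList (PySem.List.slice (c :: rest) none (some ic.1)))) <;>
        simp
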